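-- pv_equiv track=rewrite | github.com/OnlpLab/AlephBERT | utils.py | _to_feats_strs
-- ===== SOURCE A (Python) =====
-- from itertools import zip_longest
--
-- def _to_feats_strs(labels: dict) -> list:
--     feats_strs = []
--     feature_names = sorted(labels)
--     feature_values = [labels[feat_name] for feat_name in feature_names]
--     feature_values = [f for f in zip_longest(*feature_values)]
--     for fvalues in feature_values:
--         fstrs = [f'{feature_names[j]}={fvalues[j]}' for j in range(len(feature_names)) if fvalues[j] != '_']
--         feats_str = '|'.join(fstrs) if len(fstrs) > 0 else '_'
--         feats_strs.append(feats_str)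
--     return feats_strs
-- ===== SOURCE B (Python) =====
-- def _to_feats_strs(labels: dict) -> list:
--     # Consume each feature's value list destructively as a stack (reversed, pop
--     # from the end) and build each row's string with a fused separator
--     # accumulator: no transposed rows, no per-row comprehension, no join.
--     names = sorted(labels)
--     stacks = [list(reversed(labels[name])) for name in names]
--     out = []
--     for _ in range(max(map(len, stacks), default=0)):
--         s = ''
--         for name, stack in zip(names, stacks):
--             v = stack.pop() if stack else None
--             if v != '_':
--                 if s:
--                     s += '|' + f'{name}={v}'
--                 else:
--                     s = f'{name}={v}'
--         out.append(s or '_')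
--     return out
-- ===== Notes on version B (the rewrite author's own statement) =====
-- stated objective: alternative
-- what changed: B drops the zip_longest transpose, the indexed per-row comprehension and '|'.join: it consumes each sorted feature's value list destructively as a reversed stack (pop per row) and builds every row's string in place with a fused separator accumulator.
import Mathlib
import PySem

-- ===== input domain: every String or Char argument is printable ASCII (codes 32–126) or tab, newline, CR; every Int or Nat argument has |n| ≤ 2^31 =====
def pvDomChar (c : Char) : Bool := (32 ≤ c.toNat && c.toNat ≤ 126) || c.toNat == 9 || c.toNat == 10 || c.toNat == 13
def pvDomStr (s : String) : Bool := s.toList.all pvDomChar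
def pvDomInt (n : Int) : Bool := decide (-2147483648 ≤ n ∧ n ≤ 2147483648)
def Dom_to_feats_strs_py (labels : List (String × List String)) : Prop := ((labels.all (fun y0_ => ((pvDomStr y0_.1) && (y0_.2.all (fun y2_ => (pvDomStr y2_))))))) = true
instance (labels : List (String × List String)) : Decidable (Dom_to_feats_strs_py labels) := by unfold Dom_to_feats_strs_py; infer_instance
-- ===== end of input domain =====

-- B replaces A's zip_longest transpose + indexed per-row comprehension + '|'.join by
-- destructive reversed stks (one pop per feature per row) and a fused separator
-- accumulator building each row string in place (alternative decomposition, same cost).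

-- f'{v}' where v : Optional[str] — None renders as "None"
def pvOptStr (v : Option String) : String :=
  match v with
  | some s => s
  | none => "None"

-- ===== PORT A =====
-- itertools.zip_longest(*cols) with fillvalue None, exact: row i holds cols[j][i] (None past the end),
-- and there are max-length many rows.
def pvMaxLen (cols : List (List String)) : Nat :=
  cols.foldl (fun m c => max m c.length) 0

def pvZipLongest (cols : List (List String)) : List (List (Option String)) :=
  (List.range (pvMaxLen cols)).map (fun i => cols.map (fun col => col[i]?))

def to_feats_strs_py (labels : List (String × List String)) : List String :=
  let d := PySem.Dict.ofList labels
  let feature_names := PySem.List.sorted (PySem.Dict.keys d) (fun x => x) false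
  let feature_values := feature_names.map (fun k => PySem.Dict.getD d k [])
  let rows := pvZipLongest feature_values
  rows.foldl (fun acc fvalues =>
    let fstrs := (List.range feature_names.length).filterMap (fun j =>
      if fvalues.getD j none ≠ some "_" then
        some ((feature_names.getD j "") ++ "=" ++ pvOptStr (fvalues.getD j none))
      else none)
    acc ++ [if fstrs.length > 0 then PySem.Str.join "|" fstrs else "_"]) []

-- ===== PORT B =====
-- stack.pop() if stack else None — pops the last element when nonempty
def pvPop (col : List String) : Option String × List String :=
  match col.getLast? with
  | some v => (some v, col.dropLast)
  | none => (none, col)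

-- one pass of B's inner loop: pops every stack once, accumulating the row string
def pvRowStep (names : List String) (stks : List (List String)) : String × List (List String) :=
  (names.zip stks).foldl
    (fun acc nc =>
      let p := pvPop nc.2
      let s :=
        if p.1 ≠ some "_" then
          let entry := nc.1 ++ "=" ++ pvOptStr p.1
          if acc.1 ≠ "" then acc.1 ++ ("|" ++ entry) else entry
        else acc.1
      (s, acc.2 ++ [p.2]))
    ("", [])

def to_feats_strs_py_alt (labels : List (String × List String)) : List String :=
  let d := PySem.Dict.ofList labels
  let names := PySem.List.sorted (PySem.Dict.keys d) (fun x => x) false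
  let stks := names.map (fun name => (PySem.Dict.getD d name []).reverse)
  let n := stks.foldl (fun m c => max m c.length) 0
  ((List.range n).foldl (fun st _ =>
      let r := pvRowStep names st.2
      (st.1 ++ [if r.1 = "" then "_" else r.1], r.2)) (([] : List String), stks)).1

-- ===== PRECONDITION & SPEC =====
def Spec_to_feats_strs_py (labels : List (String × List String)) (out : List String) : Prop := out = to_feats_strs_py_alt labels
instance (labels : List (String × List String)) (out : List String) : Decidable (Spec_to_feats_strs_py labels out) := by unfold Spec_to_feats_strs_py; infer_instance

-- ===== CLAIM (what is proved, stated in full; the proofs are below) =====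
def Claim_equal_to_feats_strs_py : Prop := ∀ (labels : List (String × List String)), Dom_to_feats_strs_py labels → Spec_to_feats_strs_py labels (to_feats_strs_py labels)

-- ===== LEMMAS AND PROOFS =====

-- the single formatted entry contributed by feature `name` at position `i` (shared normal form)
def pvEnt (d : PySem.Dict String (List String)) (i : Nat) (name : String) : Option String :=
  if (PySem.Dict.getD d name [])[i]? ≠ some "_" then
    some (name ++ "=" ++ pvOptStr (PySem.Dict.getD d name [])[i]?)
  else none

-- B's separator accumulator as a fold
def pvStrFold (s : String) (l : List String) : String :=
  l.foldl (fun s e => if s = "" then e else s ++ "|" ++ e) s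

-- common normal form of both ports
def pvCanon (labels : List (String × List String)) : List String :=
  let d := PySem.Dict.ofList labels
  let names := PySem.List.sorted (PySem.Dict.keys d) (fun x => x) false
  (List.range (pvMaxLen (names.map (fun k => PySem.Dict.getD d k [])))).map
    (fun i =>
      let fstrs := names.filterMap (pvEnt d i)
      if fstrs.length > 0 then PySem.Str.join "|" fstrs else "_")

-- ---- A-side lemmas ----

theorem pv_filterMap_range_getD {α β : Type} (l : List α) (dflt : α) (G : α → Option β) :
    (List.range l.length).filterMap (fun j => G (l.getD j dflt)) = l.filterMap G := by
  induction l with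
  | nil => simp
  | cons x xs ih =>
    rw [List.length_cons, List.range_succ_eq_map, List.filterMap_cons, List.filterMap_map]
    simp only [List.getD_cons_zero, List.getD_cons_succ, Function.comp]
    simp only [List.getD_eq_getElem?_getD] at ih
    cases h : G x <;> simp [h, ih]

theorem pv_A_row (d : PySem.Dict String (List String)) (names : List String) (i : Nat) :
    (List.range names.length).filterMap (fun j =>
        if ((names.map (fun k => PySem.Dict.getD d k [])).map (fun col => col[i]?)).getD j none ≠ some "_" then
          some ((names.getD j "") ++ "=" ++ pvOptStr (((names.map (fun k => PySem.Dict.getD d k [])).map (fun col => col[i]?)).getD j none))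
        else none)
      = names.filterMap (pvEnt d i) := by
  have hcongr :
      (List.range names.length).filterMap (fun j =>
          if ((names.map (fun k => PySem.Dict.getD d k [])).map (fun col => col[i]?)).getD j none ≠ some "_" then
            some ((names.getD j "") ++ "=" ++ pvOptStr (((names.map (fun k => PySem.Dict.getD d k [])).map (fun col => col[i]?)).getD j none))
          else none)
        = (List.range names.length).filterMap (fun j => pvEnt d i (names.getD j "")) := by
    refine List.filterMap_congr ?_
    intro j hj
    rw [List.mem_range] at hj
    have h1 : ((names.map (fun k => PySem.Dict.getD d k [])).map (fun col => col[i]?)).getD j none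
        = (PySem.Dict.getD d (names.getD j "") [])[i]? := by
      rw [List.map_map]
      simp [List.getD_eq_getElem?_getD, List.getElem?_eq_getElem hj]
    rw [h1, pvEnt]
  rw [hcongr, pv_filterMap_range_getD names "" (pvEnt d i)]

theorem to_feats_strs_py_eq_canon (labels : List (String × List String)) :
    to_feats_strs_py labels = pvCanon labels := by
  unfold to_feats_strs_py pvZipLongest pvCanon
  rw [PySem.List.foldl_append_singleton_eq_map, List.nil_append, List.map_map]
  refine List.map_congr_left ?_
  intro i _
  simp only [Function.comp]
  rw [pv_A_row]

-- ---- B-side lemmas ----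

theorem pv_join_shift_chars (sep a x : List Char) (r : List (List Char)) :
    PySem.Chars.join sep ((a ++ sep ++ x) :: r) = PySem.Chars.join sep (a :: x :: r) := by
  cases r with
  | nil => simp [PySem.Chars.join_singleton, PySem.Chars.join_cons_cons]
  | cons z r' =>
      rw [PySem.Chars.join_cons_cons, PySem.Chars.join_cons_cons, PySem.Chars.join_cons_cons]
      simp [List.append_assoc]

theorem pv_join_shift (s x : String) (r : List String) :
    PySem.Str.join "|" ((s ++ "|" ++ x) :: r) = PySem.Str.join "|" (s :: x :: r) := by
  unfold PySem.Str.join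
  congr 1
  rw [List.map_cons, List.map_cons, List.map_cons]
  rw [show (s ++ "|" ++ x).toList = s.toList ++ "|".toList ++ x.toList by
        simp [String.toList_append]]
  exact pv_join_shift_chars "|".toList s.toList x.toList (r.map String.toList)

theorem pv_append_sep_ne (s x : String) : s ++ "|" ++ x ≠ "" := by
  intro he
  have hl : (s ++ "|" ++ x).length = 0 := by rw [he]; rfl
  rw [String.length_append, String.length_append] at hl
  have : ("|" : String).length = 1 := rfl
  omega

theorem pv_strFold_ne_empty : ∀ (l : List String) (s : String), s ≠ "" → pvStrFold s l ≠ "" := by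
  intro l
  induction l with
  | nil => intro s h; exact h
  | cons x r ih =>
      intro s h
      have : pvStrFold s (x :: r) = pvStrFold (s ++ "|" ++ x) r := by
        simp [pvStrFold, h]
      rw [this]
      exact ih _ (pv_append_sep_ne s x)

theorem pv_strFold_join : ∀ (l : List String) (s : String), s ≠ "" →
    pvStrFold s l = PySem.Str.join "|" (s :: l) := by
  intro l
  induction l with
  | nil =>
      intro s _
      show s = PySem.Str.join "|" [s]
      unfold PySem.Str.join
      rw [List.map_cons, List.map_nil, PySem.Chars.join_singleton, String.ofList_toList]
  | cons x r ih =>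
      intro s h
      have h1 : pvStrFold s (x :: r) = pvStrFold (s ++ "|" ++ x) r := by
        simp [pvStrFold, h]
      rw [h1, ih _ (pv_append_sep_ne s x), pv_join_shift]

theorem pv_row_eq (l : List String) (hne : ∀ e ∈ l, e ≠ "") :
    (if pvStrFold "" l = "" then "_" else pvStrFold "" l)
      = (if l.length > 0 then PySem.Str.join "|" l else "_") := by
  cases l with
  | nil => simp [pvStrFold]
  | cons x r =>
      have hx : x ≠ "" := hne x (List.mem_cons_self ..)
      have h0 : pvStrFold "" (x :: r) = pvStrFold x r := by simp [pvStrFold]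
      have hjoin : pvStrFold x r = PySem.Str.join "|" (x :: r) := pv_strFold_join r x hx
      have hne' : pvStrFold "" (x :: r) ≠ "" := by
        rw [h0]; exact pv_strFold_ne_empty r x hx
      rw [if_neg hne', h0, hjoin]
      simp

theorem pv_ent_ne_empty (d : PySem.Dict String (List String)) (i : Nat) (names : List String) :
    ∀ e ∈ names.filterMap (pvEnt d i), e ≠ "" := by
  intro e he
  rw [List.mem_filterMap] at he
  obtain ⟨n, _, hn⟩ := he
  unfold pvEnt at hn
  split_ifs at hn
  injection hn with hn
  intro habs
  rw [← hn] at habs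
  have hl : (n ++ "=" ++ pvOptStr (PySem.Dict.getD d n [])[i]?).length = 0 := by rw [habs]; rfl
  rw [String.length_append, String.length_append] at hl
  have : ("=" : String).length = 1 := rfl
  omega

theorem pv_pop_reverse (g : List String) : pvPop g.reverse = (g.head?, g.tail.reverse) := by
  cases g with
  | nil => simp [pvPop]
  | cons a t =>
      unfold pvPop
      rw [List.getLast?_reverse]
      simp [List.reverse_cons]

theorem pv_rowStep_aux (d : PySem.Dict String (List String)) (k : Nat) :
    ∀ (names : List String) (s : String) (acc : List (List String)),
      names.foldl
        (fun acc n =>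
          let nc : String × List String := (n, ((PySem.Dict.getD d n []).drop k).reverse)
          let p := pvPop nc.2
          let s :=
            if p.1 ≠ some "_" then
              let entry := nc.1 ++ "=" ++ pvOptStr p.1
              if acc.1 ≠ "" then acc.1 ++ ("|" ++ entry) else entry
            else acc.1
          (s, acc.2 ++ [p.2]))
        (s, acc)
      = (pvStrFold s (names.filterMap (pvEnt d k)),
         acc ++ names.map (fun n => ((PySem.Dict.getD d n []).drop (k + 1)).reverse)) := by
  intro names
  induction names with
  | nil => intro s acc; simp [pvStrFold]
  | cons n ns ih =>
      intro s acc
      rw [List.foldl_cons]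
      have hpop : pvPop ((PySem.Dict.getD d n []).drop k).reverse
          = ((PySem.Dict.getD d n [])[k]?, ((PySem.Dict.getD d n []).drop (k + 1)).reverse) := by
        rw [pv_pop_reverse, List.head?_drop, List.tail_drop]
      simp only [hpop]
      by_cases hc : (PySem.Dict.getD d n [])[k]? ≠ some "_"
      · have hent : pvEnt d k n = some (n ++ "=" ++ pvOptStr (PySem.Dict.getD d n [])[k]?) := by
          unfold pvEnt; rw [if_pos hc]
        rw [if_pos hc, List.filterMap_cons, hent]
        rw [ih]
        simp [pvStrFold, List.append_assoc, String.append_assoc]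
      · have hent : pvEnt d k n = none := by
          unfold pvEnt; rw [if_neg hc]
        rw [if_neg hc, List.filterMap_cons, hent]
        rw [ih]
        simp [List.append_assoc]

theorem pv_rowStep_eq (d : PySem.Dict String (List String)) (names : List String) (k : Nat) :
    pvRowStep names (names.map (fun nn => ((PySem.Dict.getD d nn []).drop k).reverse))
      = (pvStrFold "" (names.filterMap (pvEnt d k)),
         names.map (fun nn => ((PySem.Dict.getD d nn []).drop (k + 1)).reverse)) := by
  unfold pvRowStep
  have hzip : ∀ (l : List String), l.zip (l.map (fun nn => ((PySem.Dict.getD d nn []).drop k).reverse))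
      = l.map (fun n => (n, ((PySem.Dict.getD d n []).drop k).reverse)) := by
    intro l
    induction l with
    | nil => simp
    | cons a t iht => simp [iht]
  rw [hzip names, List.foldl_map]
  exact pv_rowStep_aux d k names "" []

theorem pv_rows_eq (d : PySem.Dict String (List String)) (names : List String) :
    ∀ (n k : Nat) (acc : List String),
      (List.range n).foldl
        (fun st _ =>
          let r := pvRowStep names st.2
          (st.1 ++ [if r.1 = "" then "_" else r.1], r.2))
        (acc, names.map (fun nn => ((PySem.Dict.getD d nn []).drop k).reverse))
      = (acc ++ (List.range n).map (fun i =>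
            if pvStrFold "" (names.filterMap (pvEnt d (k + i))) = "" then "_"
            else pvStrFold "" (names.filterMap (pvEnt d (k + i)))),
         names.map (fun nn => ((PySem.Dict.getD d nn []).drop (k + n)).reverse)) := by
  intro n
  induction n with
  | zero => intro k acc; simp
  | succ m ih =>
      intro k acc
      rw [List.range_succ, List.foldl_append, ih k acc]
      simp only [List.foldl_cons, List.foldl_nil]
      rw [pv_rowStep_eq d names (k + m)]
      simp [List.append_assoc, Nat.add_assoc]

theorem to_feats_strs_py_alt_eq_canon (labels : List (String × List String)) :
    to_feats_strs_py_alt labels = pvCanon labels := by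
  unfold to_feats_strs_py_alt pvCanon
  set d := PySem.Dict.ofList labels with hd
  set names := PySem.List.sorted (PySem.Dict.keys d) (fun x => x) false with hn
  have hstacks : names.map (fun name => (PySem.Dict.getD d name []).reverse)
      = names.map (fun nn => ((PySem.Dict.getD d nn []).drop 0).reverse) := by
    simp
  have hmax : (names.map (fun name => (PySem.Dict.getD d name []).reverse)).foldl
        (fun m c => max m c.length) 0
      = pvMaxLen (names.map (fun k => PySem.Dict.getD d k [])) := by
    unfold pvMaxLen
    rw [List.foldl_map, List.foldl_map]
    simp
  simp only []
  rw [hmax, hstacks, pv_rows_eq d names (pvMaxLen (names.map (fun k => PySem.Dict.getD d k []))) 0 []]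
  simp only [List.nil_append, Nat.zero_add]
  refine List.map_congr_left ?_
  intro i _
  exact pv_row_eq (names.filterMap (pvEnt d i)) (pv_ent_ne_empty d i names)

-- ===== VERDICT (by name: the statement is the Claim_ definition above) =====
theorem to_feats_strs_py_spec : Claim_equal_to_feats_strs_py := by
  intro labels _
  unfold Spec_to_feats_strs_py
  rw [to_feats_strs_py_eq_canon, to_feats_strs_py_alt_eq_canon]
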